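-- pv_equiv track=rewrite | github.com/Ihsane-Mon/chiffrement | algo_nocom.py | inv_tissage_diagonal
-- ===== SOURCE A (Python) =====
-- N = 4
--
-- T_MIX_INV = [
--     [212, 161,   7,  59],
--     [ 59, 212, 161,   7],
--     [  7,  59, 212, 161],
--     [161,   7,  59, 212],
-- ]
--
-- def inv_tissage_diagonal(M: list) -> list:
--     result = [row[:] for row in M]
--     for d in range(N):
--         diag = [M[i][(d + i) % N] for i in range(N)]
--         new_diag = [sum(T_MIX_INV[r][c] * diag[c] for c in range(N)) % 256 for r in range(N)]
--         for i in range(N):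
--             result[i][(d + i) % N] = new_diag[i]
--     return result
-- ===== SOURCE B (Python) =====
-- N = 4
--
-- T_MIX_INV = [
--     [212, 161,   7,  59],
--     [ 59, 212, 161,   7],
--     [  7,  59, 212, 161],
--     [161,   7,  59, 212],
-- ]
--
-- def inv_tissage_diagonal(M: list) -> list:
--     # Per-cell closed form: no diagonal extraction/scatter buffers.
--     result = [row[:] for row in M]
--     for i in range(N):
--         for j in range(N):
--             result[i][j] = sum(T_MIX_INV[i][c] * M[c][(j - i + c) % N] for c in range(N)) % 256
--     return result
-- ===== Notes on version B (the rewrite author's own statement) =====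
-- stated objective: simpler
-- what changed: Replaces the per-diagonal extract/mix/scatter passes and their diag/new_diag buffers by a direct per-cell formula result[i][j] = sum_c T_MIX_INV[i][c]*M[c][(j-i+c)%N] % 256 computed in a plain triple loop.
import Mathlib
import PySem

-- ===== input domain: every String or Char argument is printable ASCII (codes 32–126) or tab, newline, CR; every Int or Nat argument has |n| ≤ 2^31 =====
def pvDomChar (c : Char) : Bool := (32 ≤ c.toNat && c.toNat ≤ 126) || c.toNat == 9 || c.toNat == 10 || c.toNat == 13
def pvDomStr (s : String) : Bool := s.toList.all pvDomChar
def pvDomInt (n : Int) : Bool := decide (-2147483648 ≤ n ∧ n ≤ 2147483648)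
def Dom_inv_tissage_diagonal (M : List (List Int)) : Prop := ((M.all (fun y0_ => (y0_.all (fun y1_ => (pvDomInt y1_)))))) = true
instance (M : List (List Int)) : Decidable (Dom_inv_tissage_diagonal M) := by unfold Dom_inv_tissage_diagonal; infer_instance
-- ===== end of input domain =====

-- B replaces A's per-diagonal extract/mix/scatter (with diag/new_diag buffers) by a
-- direct per-cell formula in a plain triple loop; neither mutates M.

def pvT_MIX_INV : List (List Int) :=
  [[212, 161, 7, 59], [59, 212, 161, 7], [7, 59, 212, 161], [161, 7, 59, 212]]

-- ===== PORT A =====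
-- row accesses are guarded by Pre_ (in range there); getD is exact on Pre_.
-- Python's `%` on nonnegative ints is Nat `%`; `x % 256` on Int is Lean `emod`,
-- which agrees with Python `%` for the positive divisor 256.
def inv_tissage_diagonal (M : List (List Int)) : List (List Int) :=
  let result := M.map (fun row => row)      -- result = [row[:] for row in M]
  (List.range 4).foldl (fun result d =>
    let diag := (List.range 4).map (fun i => (M.getD i []).getD ((d + i) % 4) 0)
    let new_diag := (List.range 4).map (fun r =>
      ((List.range 4).foldl (fun s c => s + (pvT_MIX_INV.getD r []).getD c 0 * diag.getD c 0) 0) % 256)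
    (List.range 4).foldl (fun result i =>
      result.modify i (fun row => row.set ((d + i) % 4) (new_diag.getD i 0))) result) result

-- ===== PORT B =====
-- Python computes (j - i + c) % 4; since i ≤ 3, (j + 4 - i + c) % 4 is the same
-- value with Nat subtraction never truncating.
def inv_tissage_diagonal_alt (M : List (List Int)) : List (List Int) :=
  let result := M.map (fun row => row)
  (List.range 4).foldl (fun result i =>
    (List.range 4).foldl (fun result j =>
      let v := ((List.range 4).foldl (fun s c =>
        s + (pvT_MIX_INV.getD i []).getD c 0 * (M.getD c []).getD ((j + 4 - i + c) % 4) 0) 0) % 256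
      result.modify i (fun row => row.set j v)) result) result

-- ===== PRECONDITION & SPEC =====
-- Pre_: exactly the inputs on which A returns (A raises IndexError when M has
-- fewer than 4 rows or one of the first 4 rows has fewer than 4 entries).
def Pre_inv_tissage_diagonal (M : List (List Int)) : Prop :=
  4 ≤ M.length ∧ ∀ r ∈ M.take 4, 4 ≤ r.length
instance (M : List (List Int)) : Decidable (Pre_inv_tissage_diagonal M) := by
  unfold Pre_inv_tissage_diagonal; infer_instance

def pvWitness_inv_tissage_diagonal : List (List Int) :=
  [[1,2,3,4],[5,6,7,8],[9,10,11,12],[13,14,15,16]]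

def Spec_inv_tissage_diagonal (M : List (List Int)) (out : List (List Int)) : Prop := out = inv_tissage_diagonal_alt M
instance (M : List (List Int)) (out : List (List Int)) : Decidable (Spec_inv_tissage_diagonal M out) := by unfold Spec_inv_tissage_diagonal; infer_instance

-- ===== CLAIM (what is proved, stated in full; the proofs are below) =====
def Claim_equal_inv_tissage_diagonal : Prop := ∀ (M : List (List Int)), Dom_inv_tissage_diagonal M → Pre_inv_tissage_diagonal M → Spec_inv_tissage_diagonal M (inv_tissage_diagonal M)

-- ===== LEMMAS AND PROOFS =====

theorem pv_len4 {l : List Int} (h : 4 ≤ l.length) :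
    ∃ a b c d t, l = a :: b :: c :: d :: t := by
  match l, h with
  | a :: b :: c :: d :: t, _ => exact ⟨a, b, c, d, t, rfl⟩

theorem pv_rows4 {M : List (List Int)} (h : 4 ≤ M.length) :
    ∃ r0 r1 r2 r3 rest, M = r0 :: r1 :: r2 :: r3 :: rest := by
  match M, h with
  | r0 :: r1 :: r2 :: r3 :: rest, _ => exact ⟨r0, r1, r2, r3, rest, rfl⟩

-- ===== VERDICT (by name: the statement is the Claim_ definition above) =====
theorem inv_tissage_diagonal_spec : Claim_equal_inv_tissage_diagonal := by
  intro M _ hpre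
  obtain ⟨hlen, hrows⟩ := hpre
  obtain ⟨r0, r1, r2, r3, rest, rfl⟩ := pv_rows4 hlen
  obtain ⟨a0, a1, a2, a3, t0, rfl⟩ := pv_len4 (hrows r0 (by simp [List.take]))
  obtain ⟨b0, b1, b2, b3, t1, rfl⟩ := pv_len4 (hrows r1 (by simp [List.take]))
  obtain ⟨c0, c1, c2, c3, t2, rfl⟩ := pv_len4 (hrows r2 (by simp [List.take]))
  obtain ⟨d0, d1, d2, d3, t3, rfl⟩ := pv_len4 (hrows r3 (by simp [List.take]))
  show inv_tissage_diagonal _ = inv_tissage_diagonal_alt _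
  rfl
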